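-- pv_equiv track=rewrite | github.com/denoslab/friendlyfl-router | friendlyfl/utils/display_util.py | sort_runs
-- ===== SOURCE A (Python) =====
-- def sort_runs(runs):
--     merged_runs = {}
--
--     for run in runs:
--         batch = run['batch']
--         if batch not in merged_runs:
--             merged_runs[batch] = run
--         else:
--             merged_runs[batch] = update_run(merged_runs[batch], run)
--     sorted_dict = dict(sorted(merged_runs.items(), key=lambda x: x[0]))
--     return list(sorted_dict.values())
--
-- def update_run(run_old, run_new):
--     create_at = "created_at"
--     update_at = "updated_at"
--     status = "status"
--
--     create_at_cur = run_old[create_at]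
--     update_at_cur = run_old[update_at]
--     status_cur = run_old[status]
--
--     create_at_new = run_new[create_at]
--     update_at_new = run_new[update_at]
--     status_new = run_new[status]
--
--     if create_at_new < create_at_cur:
--         run_old[create_at] = create_at_new
--     if update_at_new > update_at_cur:
--         run_old[update_at] = update_at_new
--     if status_new < status_cur:
--         run_old[status] = status_new
--     return run_old
-- ===== SOURCE B (Python) =====
-- def sort_runs(runs):
--     result = []
--     for run in sorted(runs, key=lambda r: r['batch']):
--         if result and result[-1]['batch'] == run['batch']:
--             last = result[-1]
--             last['created_at'] = min(last['created_at'], run['created_at'])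
--             last['updated_at'] = max(last['updated_at'], run['updated_at'])
--             last['status'] = min(last['status'], run['status'])
--         else:
--             result.append(run)
--     return result
-- ===== Notes on version B (the rewrite author's own statement) =====
-- stated objective: alternative
-- what changed: B replaces A's dict-accumulate-then-sort-items pipeline by a stable sort of the runs keyed on 'batch' followed by a single adjacent-grouping pass that folds each equal-batch group into its first run with inline min/max merging (no dict, no update_run helper).
import Mathlib
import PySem

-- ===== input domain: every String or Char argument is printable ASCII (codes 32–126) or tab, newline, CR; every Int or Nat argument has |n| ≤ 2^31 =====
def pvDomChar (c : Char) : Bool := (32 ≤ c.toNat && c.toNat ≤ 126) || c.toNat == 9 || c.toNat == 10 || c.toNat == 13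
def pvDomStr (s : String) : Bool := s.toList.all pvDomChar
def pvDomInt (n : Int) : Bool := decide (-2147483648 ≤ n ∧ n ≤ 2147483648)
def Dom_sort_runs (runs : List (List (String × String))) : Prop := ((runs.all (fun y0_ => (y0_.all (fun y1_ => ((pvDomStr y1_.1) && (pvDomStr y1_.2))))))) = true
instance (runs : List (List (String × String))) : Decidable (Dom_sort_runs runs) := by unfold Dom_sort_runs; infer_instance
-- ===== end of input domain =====

-- B merges equal-'batch' runs by a stable sort on 'batch' plus one adjacent-grouping pass, instead
-- of A's dict accumulation followed by a sort of the dict items.  Both Pythons mutate the first run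
-- of each batch group in place; the equivalence proved here is about the RETURN value.

-- shared primitives: the Python dict reads d[k] (with '' where the admitted inputs never raise)
-- and writes d[k] = v, on the association-list representation of a dict

def pvGetK (r : List (String × String)) (k : String) : String :=
  ((PySem.Dict.mk r).get? k).getD ""

def pvSetK (r : List (String × String)) (k : String) (v : String) : List (String × String) :=
  ((PySem.Dict.mk r).insert k v).items


-- ===== PORT A =====

def update_run (run_old run_new : List (String × String)) : List (String × String) :=
  let create_at_cur := pvGetK run_old "created_at"
  let update_at_cur := pvGetK run_old "updated_at"
  let status_cur := pvGetK run_old "status"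
  let create_at_new := pvGetK run_new "created_at"
  let update_at_new := pvGetK run_new "updated_at"
  let status_new := pvGetK run_new "status"
  let r1 := if create_at_new < create_at_cur then pvSetK run_old "created_at" create_at_new else run_old
  let r2 := if update_at_cur < update_at_new then pvSetK r1 "updated_at" update_at_new else r1
  if status_new < status_cur then pvSetK r2 "status" status_new else r2

def sort_runs_step (d : PySem.Dict String (List (String × String))) (run : List (String × String)) :
    PySem.Dict String (List (String × String)) :=
  let batch := pvGetK run "batch"
  if d.contains batch = false then d.insert batch run
  else d.insert batch (update_run (d.getD batch []) run)

def sort_runs (runs : List (List (String × String))) : List (List (String × String)) :=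
  let merged_runs := runs.foldl sort_runs_step PySem.Dict.empty
  let sorted_dict := PySem.Dict.ofList (PySem.List.sorted merged_runs.items (fun x => x.1) false)
  sorted_dict.values


-- ===== PORT B =====

def pvMergeInto (last run : List (String × String)) : List (String × String) :=
  let r1 := pvSetK last "created_at" (min (pvGetK last "created_at") (pvGetK run "created_at"))
  let r2 := pvSetK r1 "updated_at" (max (pvGetK r1 "updated_at") (pvGetK run "updated_at"))
  pvSetK r2 "status" (min (pvGetK r2 "status") (pvGetK run "status"))

def pvGroupStep (result : List (List (String × String))) (run : List (String × String)) :
    List (List (String × String)) :=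
  match result with
  | last :: rest =>
      if pvGetK last "batch" == pvGetK run "batch" then pvMergeInto last run :: rest
      else run :: last :: rest
  | [] => [run]

def sort_runs_alt (runs : List (List (String × String))) : List (List (String × String)) :=
  ((PySem.List.sorted runs (fun r => pvGetK r "batch") false).foldl pvGroupStep []).reverse


-- ===== PRECONDITION & SPEC =====
-- Pre_ excludes exactly (a) the inputs on which the Python A raises KeyError: a run without a
-- 'batch' key, or a run in a shared-batch group missing one of 'created_at'/'updated_at'/'status'
-- (the Python B raises KeyError on those same inputs); and (b) association lists whose keys are
-- not distinct, which do not represent a Python dict at all.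

def Pre_sort_runs (runs : List (List (String × String))) : Prop :=
  ∀ r ∈ runs, (r.map Prod.fst).Nodup ∧ "batch" ∈ r.map Prod.fst ∧
    (1 < runs.countP (fun r' => pvGetK r' "batch" == pvGetK r "batch") →
      "created_at" ∈ r.map Prod.fst ∧ "updated_at" ∈ r.map Prod.fst ∧ "status" ∈ r.map Prod.fst)

instance (runs : List (List (String × String))) : Decidable (Pre_sort_runs runs) := by
  unfold Pre_sort_runs; infer_instance

def pvWitness_sort_runs : (List (List (String × String))) :=
  [[("batch", "b2"), ("created_at", "3"), ("updated_at", "4"), ("status", "1")],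
   [("batch", "b1"), ("created_at", "2"), ("updated_at", "9"), ("status", "0")],
   [("batch", "b2"), ("created_at", "1"), ("updated_at", "7"), ("status", "2")]]

def Spec_sort_runs (runs : List (List (String × String))) (out : List (List (String × String))) : Prop := out = sort_runs_alt runs
instance (runs : List (List (String × String))) (out : List (List (String × String))) : Decidable (Spec_sort_runs runs out) := by unfold Spec_sort_runs; infer_instance

-- ===== CLAIM (what is proved, stated in full; the proofs are below) =====
def Claim_equal_sort_runs : Prop := ∀ (runs : List (List (String × String))), Dom_sort_runs runs → Pre_sort_runs runs → Spec_sort_runs runs (sort_runs runs)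

-- ===== LEMMAS AND PROOFS =====

-- proof-side abbreviations: the batch key of a run, the runs of one batch, and the two merge folds

def keyB (r : List (String × String)) : String := pvGetK r "batch"

def gfilter (b : String) (runs : List (List (String × String))) : List (List (String × String)) :=
  runs.filter (fun r => pvGetK r "batch" == b)

def gmergeA (b : String) (runs : List (List (String × String))) : List (String × String) :=
  match gfilter b runs with
  | [] => []
  | h :: t => t.foldl update_run h

def gfoldB (l : List (List (String × String))) : List (String × String) :=
  match l with
  | [] => []
  | h :: t => t.foldl pvMergeInto h


-- association-list / dict basics

theorem contains_mk_of_mem_fst (r : List (String × String)) (k : String)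
    (h : k ∈ r.map Prod.fst) : (PySem.Dict.mk r).contains k = true := by
  rw [PySem.Dict.contains_iff_mem_keys]; exact h

theorem pvGetK_pvSetK_ne (r : List (String × String)) (k v k' : String) (h : k' ≠ k) :
    pvGetK (pvSetK r k v) k' = pvGetK r k' := by
  unfold pvGetK pvSetK
  rw [show PySem.Dict.mk (((PySem.Dict.mk r).insert k v).items) = (PySem.Dict.mk r).insert k v from rfl,
      PySem.Dict.get?_insert_of_ne _ _ h]

theorem map_fst_pvSetK (r : List (String × String)) (k v : String)
    (h : k ∈ r.map Prod.fst) : (pvSetK r k v).map Prod.fst = r.map Prod.fst := by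
  unfold pvSetK
  rw [PySem.Dict.items_insert_of_contains _ _ (contains_mk_of_mem_fst r k h), List.map_map]
  apply List.map_congr_left
  intro p _
  simp only [Function.comp]
  split
  · next hh => simp at hh; simp [hh]
  · rfl

theorem get?_of_mem_fst (r : List (String × String)) (k : String)
    (h : k ∈ r.map Prod.fst) : (PySem.Dict.mk r).get? k = some (pvGetK r k) := by
  have hc := contains_mk_of_mem_fst r k h
  rw [PySem.Dict.contains_eq_isSome_get?] at hc
  rcases Option.isSome_iff_exists.mp hc with ⟨v, hv⟩
  simp [pvGetK, hv]

theorem mapReplace_id (r : List (String × String)) (k v : String)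
    (h : k ∉ r.map Prod.fst) :
    r.map (fun p => if p.1 == k then (k, v) else p) = r := by
  induction r with
  | nil => rfl
  | cons p t ih =>
    simp only [List.map_cons, List.mem_cons, not_or] at h ⊢
    rw [if_neg (by simpa using fun hh : p.1 = k => h.1 hh.symm), ih h.2]

theorem mapReplace_self (r : List (String × String)) (k v : String)
    (hnd : (r.map Prod.fst).Nodup) (hg : (k, v) ∈ r) :
    r.map (fun p => if p.1 == k then (k, v) else p) = r := by
  induction r with
  | nil => rfl
  | cons p t ih =>
    simp only [List.map_cons, List.nodup_cons] at hnd ⊢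
    rcases List.mem_cons.mp hg with hp | hp
    · rw [← hp, if_pos (by simp)]
      rw [← hp] at hnd
      rw [mapReplace_id t k v hnd.1]
    · have h1 : p.1 ≠ k := fun hh =>
        hnd.1 (hh ▸ (List.mem_map.mpr ⟨_, hp, rfl⟩))
      rw [if_neg (by simpa using h1), ih hnd.2 hp]

theorem pvSetK_self (r : List (String × String)) (k : String)
    (hnd : (r.map Prod.fst).Nodup) (h : k ∈ r.map Prod.fst) :
    pvSetK r k (pvGetK r k) = r := by
  have hg := get?_of_mem_fst r k h
  rw [PySem.Dict.get?_eq_some_iff_mem_items _ _ _ hnd] at hg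
  unfold pvSetK
  rw [PySem.Dict.items_insert_of_contains _ _ (contains_mk_of_mem_fst r k h)]
  exact mapReplace_self r k _ hnd hg

theorem get?_eq_some_getD (d : PySem.Dict String (List (String × String))) (b : String)
    (h : d.contains b = true) : d.get? b = some (d.getD b []) := by
  rw [PySem.Dict.contains_eq_isSome_get?] at h
  rcases Option.isSome_iff_exists.mp h with ⟨v, hv⟩
  rw [PySem.Dict.getD_eq_get?_getD, hv]; rfl


-- the two merge bodies agree on dict-shaped accumulators holding the three keys

theorem update_eq_merge (a r : List (String × String))
    (hnd : (a.map Prod.fst).Nodup)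
    (hca : "created_at" ∈ a.map Prod.fst) (hua : "updated_at" ∈ a.map Prod.fst)
    (hst : "status" ∈ a.map Prod.fst) :
    update_run a r = pvMergeInto a r := by
  simp only [update_run, pvMergeInto]
  -- stage 1
  have e1 : pvSetK a "created_at" (min (pvGetK a "created_at") (pvGetK r "created_at"))
      = (if pvGetK r "created_at" < pvGetK a "created_at"
         then pvSetK a "created_at" (pvGetK r "created_at") else a) := by
    by_cases h1 : pvGetK r "created_at" < pvGetK a "created_at"
    · rw [if_pos h1, min_eq_right (le_of_lt h1)]
    · rw [if_neg h1, min_eq_left (le_of_not_gt h1), pvSetK_self a _ hnd hca]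
  rw [e1]
  set R1 := (if pvGetK r "created_at" < pvGetK a "created_at"
         then pvSetK a "created_at" (pvGetK r "created_at") else a) with hR1
  have hfst1 : R1.map Prod.fst = a.map Prod.fst := by
    rw [hR1]; split
    · exact map_fst_pvSetK a _ _ hca
    · rfl
  have hnd1 : (R1.map Prod.fst).Nodup := by rw [hfst1]; exact hnd
  have hua1 : "updated_at" ∈ R1.map Prod.fst := by rw [hfst1]; exact hua
  have hst1 : "status" ∈ R1.map Prod.fst := by rw [hfst1]; exact hst
  have g1u : pvGetK R1 "updated_at" = pvGetK a "updated_at" := by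
    rw [hR1]; split
    · exact pvGetK_pvSetK_ne a _ _ _ (by decide)
    · rfl
  have g1s : pvGetK R1 "status" = pvGetK a "status" := by
    rw [hR1]; split
    · exact pvGetK_pvSetK_ne a _ _ _ (by decide)
    · rfl
  -- stage 2
  have e2 : pvSetK R1 "updated_at" (max (pvGetK R1 "updated_at") (pvGetK r "updated_at"))
      = (if pvGetK a "updated_at" < pvGetK r "updated_at"
         then pvSetK R1 "updated_at" (pvGetK r "updated_at") else R1) := by
    rw [g1u]
    by_cases h2 : pvGetK a "updated_at" < pvGetK r "updated_at"
    · rw [if_pos h2, max_eq_right (le_of_lt h2)]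
    · rw [if_neg h2, max_eq_left (le_of_not_gt h2), ← g1u, pvSetK_self R1 _ hnd1 hua1]
  rw [e2]
  set R2 := (if pvGetK a "updated_at" < pvGetK r "updated_at"
         then pvSetK R1 "updated_at" (pvGetK r "updated_at") else R1) with hR2
  have hfst2 : R2.map Prod.fst = a.map Prod.fst := by
    rw [hR2]; split
    · rw [map_fst_pvSetK R1 _ _ hua1]; exact hfst1
    · exact hfst1
  have hnd2 : (R2.map Prod.fst).Nodup := by rw [hfst2]; exact hnd
  have hst2 : "status" ∈ R2.map Prod.fst := by rw [hfst2]; exact hst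
  have g2s : pvGetK R2 "status" = pvGetK a "status" := by
    rw [hR2]; split
    · rw [pvGetK_pvSetK_ne R1 _ _ _ (by decide)]; exact g1s
    · exact g1s
  -- stage 3
  rw [g2s]
  by_cases h3 : pvGetK r "status" < pvGetK a "status"
  · rw [if_pos h3, min_eq_right (le_of_lt h3)]
  · rw [if_neg h3, min_eq_left (le_of_not_gt h3), ← g2s, pvSetK_self R2 _ hnd2 hst2]

theorem map_fst_mergeInto (a r : List (String × String))
    (hca : "created_at" ∈ a.map Prod.fst) (hua : "updated_at" ∈ a.map Prod.fst)
    (hst : "status" ∈ a.map Prod.fst) :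
    (pvMergeInto a r).map Prod.fst = a.map Prod.fst := by
  simp only [pvMergeInto]
  have f1 := map_fst_pvSetK a "created_at" (min (pvGetK a "created_at") (pvGetK r "created_at")) hca
  set R1 := pvSetK a "created_at" (min (pvGetK a "created_at") (pvGetK r "created_at"))
  have f2 := map_fst_pvSetK R1 "updated_at" (max (pvGetK R1 "updated_at") (pvGetK r "updated_at"))
    (by rw [f1]; exact hua)
  set R2 := pvSetK R1 "updated_at" (max (pvGetK R1 "updated_at") (pvGetK r "updated_at"))
  have f3 := map_fst_pvSetK R2 "status" (min (pvGetK R2 "status") (pvGetK r "status"))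
    (by rw [f2, f1]; exact hst)
  rw [f3, f2, f1]

theorem foldl_update_eq_foldl_merge (t : List (List (String × String))) :
    ∀ a, (a.map Prod.fst).Nodup →
    "created_at" ∈ a.map Prod.fst → "updated_at" ∈ a.map Prod.fst → "status" ∈ a.map Prod.fst →
    t.foldl update_run a = t.foldl pvMergeInto a := by
  induction t with
  | nil => intro a _ _ _ _; rfl
  | cons r t ih =>
    intro a hnd hca hua hst
    simp only [List.foldl_cons]
    rw [update_eq_merge a r hnd hca hua hst]
    have hfst := map_fst_mergeInto a r hca hua hst
    exact ih _ (by rw [hfst]; exact hnd) (by rw [hfst]; exact hca)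
      (by rw [hfst]; exact hua) (by rw [hfst]; exact hst)


-- characterisation of A's dict fold

theorem gfilter_ne_nil (b : String) (runs : List (List (String × String)))
    (h : b ∈ runs.map keyB) : gfilter b runs ≠ [] := by
  rcases List.mem_map.mp h with ⟨r, hr, hkr⟩
  have : r ∈ gfilter b runs := by
    simp only [gfilter, List.mem_filter]
    exact ⟨hr, by simp [← hkr, keyB]⟩
  intro hnil
  rw [hnil] at this
  exact (List.not_mem_nil).elim this

theorem step_get?_of_contains (runs : List (List (String × String))) :
    ∀ (d : PySem.Dict String (List (String × String))) (b : String), d.contains b = true →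
    (runs.foldl sort_runs_step d).get? b = some ((gfilter b runs).foldl update_run (d.getD b [])) := by
  induction runs with
  | nil =>
    intro d b hb
    simpa [gfilter] using get?_eq_some_getD d b hb
  | cons r t ih =>
    intro d b hb
    simp only [List.foldl_cons, gfilter, List.filter_cons]
    by_cases hcb : pvGetK r "batch" = b
    · have hstep : sort_runs_step d r
          = d.insert b (update_run (d.getD b []) r) := by
        simp only [sort_runs_step, hcb, hb]; rfl
      rw [hstep, if_pos (by simp [hcb])]
      have := ih (d.insert b (update_run (d.getD b []) r)) b
        (by rw [PySem.Dict.contains_insert]; simp)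
      rw [this, PySem.Dict.getD_insert]
      simp [gfilter]
    · have hbc : (pvGetK r "batch" == b) = false := by simp [hcb]
      have key : ∀ v, ((t.foldl sort_runs_step (d.insert (pvGetK r "batch") v)).get? b)
          = some ((gfilter b t).foldl update_run (d.getD b [])) := by
        intro v
        rw [ih (d.insert (pvGetK r "batch") v) b
          (by rw [PySem.Dict.contains_insert, hb]; simp),
          PySem.Dict.getD_insert, if_neg (Ne.symm hcb)]
      rw [if_neg (by simp [hbc])]
      simp only [sort_runs_step]
      split
      · exact key _
      · exact key _

theorem step_get?_of_not_contains (runs : List (List (String × String))) :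
    ∀ (d : PySem.Dict String (List (String × String))) (b : String), d.contains b = false →
    (runs.foldl sort_runs_step d).get? b =
      (match gfilter b runs with
       | [] => d.get? b
       | h :: t => some (t.foldl update_run h)) := by
  induction runs with
  | nil => intro d b _; rfl
  | cons r t ih =>
    intro d b hb
    simp only [List.foldl_cons, gfilter, List.filter_cons]
    by_cases hcb : pvGetK r "batch" = b
    · have hstep : sort_runs_step d r = d.insert b r := by
        simp only [sort_runs_step, hcb, hb]; rfl
      rw [hstep, if_pos (by simp [hcb])]
      have := step_get?_of_contains t (d.insert b r) b
        (by rw [PySem.Dict.contains_insert]; simp)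
      rw [this, PySem.Dict.getD_insert]
      simp [gfilter]
    · have key : ∀ v, ((t.foldl sort_runs_step (d.insert (pvGetK r "batch") v)).get? b)
          = (match gfilter b t with
             | [] => d.get? b
             | h :: t' => some (t'.foldl update_run h)) := by
        intro v
        rw [ih (d.insert (pvGetK r "batch") v) b
          (by rw [PySem.Dict.contains_insert, hb]; simp [Ne.symm hcb])]
        match hm : gfilter b t with
        | [] => rw [PySem.Dict.get?_insert_of_ne _ _ (Ne.symm hcb)]
        | h :: t' => rfl
      rw [if_neg (by simp [hcb])]
      simp only [sort_runs_step]
      split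
      · exact key _
      · exact key _

theorem sort_runs_char (runs : List (List (String × String))) :
    sort_runs runs =
      (PySem.List.sorted (PySem.Set.ofList (runs.map keyB)) (fun x => x) false).map
        (fun b => gmergeA b runs) := by
  have hstep_eq : sort_runs_step = fun d run =>
      d.insert (pvGetK run "batch")
        (if d.contains (pvGetK run "batch") = false then run
         else update_run (d.getD (pvGetK run "batch") []) run) := by
    funext d run
    simp only [sort_runs_step]
    split <;> rfl
  set F := runs.foldl sort_runs_step PySem.Dict.empty with hF
  have hkeys : F.keys = PySem.Set.ofList (runs.map keyB) := by
    rw [hF, hstep_eq,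
      PySem.Dict.keys_foldl_insert_key runs (fun run => pvGetK run "batch") _ PySem.Dict.empty]
    rfl
  have hndk : F.keys.Nodup := by
    rw [hkeys]; exact PySem.Set.nodup_ofList _
  have hgetD : ∀ k ∈ F.keys, F.getD k [] = gmergeA k runs := by
    intro k hk
    have hmem : k ∈ runs.map keyB := by
      rw [hkeys] at hk; exact (PySem.Set.mem_ofList _ _).mp hk
    have h2 := step_get?_of_not_contains runs PySem.Dict.empty k (by rfl)
    rw [PySem.Dict.getD_eq_get?_getD, hF, h2]
    match hm : gfilter k runs with
    | [] => exact absurd hm (gfilter_ne_nil k runs hmem)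
    | h :: t => simp [gmergeA, hm]
  have hitems : F.items = (PySem.Set.ofList (runs.map keyB)).map (fun k => (k, gmergeA k runs)) := by
    rw [PySem.Dict.items_eq_map_keys F hndk []]
    rw [List.map_congr_left (fun k hk => by rw [hgetD k hk])]
    rw [hkeys]
  have hpw := PySem.List.sorted_ofList_pairwise_lt (runs.map keyB)
  have hsorted : PySem.List.sorted F.items (fun x => x.1) false =
      (PySem.List.sorted (PySem.Set.ofList (runs.map keyB)) (fun x => x) false).map
        (fun k => (k, gmergeA k runs)) := by
    apply PySem.List.sorted_eq_of_perm_of_pairwise_lt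
    · rw [hitems]
      exact (PySem.List.sorted_perm _ _ _).map _
    · rw [List.pairwise_map]
      exact hpw
  show (PySem.Dict.ofList (PySem.List.sorted F.items (fun x => x.1) false)).values = _
  rw [hsorted]
  set S := (PySem.List.sorted (PySem.Set.ofList (runs.map keyB)) (fun x => x) false).map
        (fun k => (k, gmergeA k runs)) with hS
  have hfstS : S.map Prod.fst = PySem.List.sorted (PySem.Set.ofList (runs.map keyB)) (fun x => x) false := by
    rw [hS, List.map_map]
    exact List.map_id'' (fun k => rfl) _
  have hndS : (S.map Prod.fst).Nodup := by
    rw [hfstS]; exact hpw.imp ne_of_lt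
  have hfresh : ∀ a ∈ S, (PySem.Dict.empty : PySem.Dict String (List (String × String))).contains (Prod.fst a) = false := by
    intro a _; rfl
  have hofl : (PySem.Dict.ofList S).items = S := by
    have h := PySem.Dict.items_foldl_insert_fresh S Prod.fst Prod.snd PySem.Dict.empty hfresh hndS
    rw [show (List.map (fun a => (Prod.fst a, Prod.snd a)) S) = S from by simp] at h
    exact h
  show (PySem.Dict.ofList S).items.map (fun x => x.2) = _
  rw [hofl, hS, List.map_map]
  rfl


-- characterisation of B: a stable sort is the concatenation of its batch groups

theorem insertBy_cons {α : Type} (before : α → α → Bool) (x y : α) (ys : List α) :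
    PySem.List.insertBy before x (y :: ys) =
      if before x y then x :: y :: ys else y :: PySem.List.insertBy before x ys := by
  simp [PySem.List.insertBy]

theorem insertBy_nil {α : Type} (before : α → α → Bool) (x : α) :
    PySem.List.insertBy before x [] = [x] := by
  simp [PySem.List.insertBy]

theorem flatMap_congr' {α β : Type} (l : List α) (f g : α → List β)
    (h : ∀ b ∈ l, f b = g b) : l.flatMap f = l.flatMap g := by
  induction l with
  | nil => rfl
  | cons a t ih =>
    simp only [List.flatMap_cons]
    rw [h a (List.mem_cons_self), ih (fun b hb => h b (List.mem_cons_of_mem a hb))]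

theorem insertBy_append_left {α : Type} (before : α → α → Bool) (x : α) (l1 l2 : List α)
    (h : ∀ y ∈ l1, before x y = false) :
    PySem.List.insertBy before x (l1 ++ l2) = l1 ++ PySem.List.insertBy before x l2 := by
  induction l1 with
  | nil => rfl
  | cons y t ih =>
    rw [List.cons_append, insertBy_cons, if_neg (by rw [h y List.mem_cons_self]; simp),
      ih (fun z hz => h z (List.mem_cons_of_mem y hz)), List.cons_append]

theorem insertBy_flatMap (bs : List String) (G : String → List (List (String × String)))
    (x : List (String × String))
    (hs : bs.Pairwise (· < ·)) (hG : ∀ b ∈ bs, ∀ r ∈ G b, keyB r = b)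
    (hne : ∀ b ∈ bs, G b ≠ []) :
    PySem.List.insertBy (fun a b => decide (keyB a < keyB b)) x (bs.flatMap G) =
      if keyB x ∈ bs then bs.flatMap (fun b => if b = keyB x then G b ++ [x] else G b)
      else (PySem.List.insertBy (fun a b => decide (a < b)) (keyB x) bs).flatMap
             (fun b => if b = keyB x then [x] else G b) := by
  induction bs with
  | nil =>
    simp only [List.flatMap_nil, List.not_mem_nil, if_neg (fun h => h)]
    rw [insertBy_nil, insertBy_nil]
    simp
  | cons b bs' ih =>
    have hpw := hs
    rw [List.pairwise_cons] at hpw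
    have hGb := hG b List.mem_cons_self
    have hGbne := hne b List.mem_cons_self
    have hG' : ∀ b' ∈ bs', ∀ r ∈ G b', keyB r = b' :=
      fun b' hb' => hG b' (List.mem_cons_of_mem b hb')
    have hne' : ∀ b' ∈ bs', G b' ≠ [] := fun b' hb' => hne b' (List.mem_cons_of_mem b hb')
    rcases lt_trichotomy (keyB x) b with hlt | heq | hgt
    · -- new smallest batch: x becomes a fresh front group
      have hnotmem : keyB x ∉ b :: bs' := by
        intro hmem
        rcases List.mem_cons.mp hmem with h1 | h1
        · exact absurd h1 (ne_of_lt hlt)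
        · exact absurd (lt_trans hlt (hpw.1 _ h1)) (lt_irrefl _)
      rw [if_neg hnotmem]
      rcases hGy : G b with _ | ⟨y, t⟩
      · exact absurd hGy hGbne
      · rw [List.flatMap_cons, hGy, List.cons_append,
          insertBy_cons, if_pos (by rw [hG b List.mem_cons_self y (by rw [hGy]; exact List.mem_cons_self)]; simpa using hlt),
          insertBy_cons, if_pos (by simpa using hlt), List.flatMap_cons,
          if_pos rfl, List.flatMap_cons, if_neg (fun hh => (ne_of_lt hlt) hh.symm)]
        rw [flatMap_congr' bs' _ G (fun b' hb' => if_neg (fun (hh : b' = keyB x) =>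
          absurd (hh ▸ lt_trans hlt (hpw.1 _ hb')) (lt_irrefl _)))]
        simp [hGy]
    · -- x joins the existing group of batch b, at its end
      rw [if_pos (heq ▸ List.mem_cons_self)]
      rw [List.flatMap_cons, List.flatMap_cons, if_pos heq.symm]
      rw [insertBy_append_left _ _ _ _ (fun y hy => by
        rw [hGb y hy, heq]; simp)]
      rw [flatMap_congr' bs' _ G (fun b' hb' => if_neg (fun (hh : b' = keyB x) =>
        absurd (hpw.1 _ hb') (by rw [hh, heq]; exact lt_irrefl _)))]
      rcases bs' with _ | ⟨b2, bs2⟩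
      · rw [List.flatMap_nil, insertBy_nil]; simp
      · rcases hGy2 : G b2 with _ | ⟨y2, t2⟩
        · exact absurd hGy2 (hne' b2 List.mem_cons_self)
        · rw [List.flatMap_cons, hGy2, List.cons_append, insertBy_cons,
            if_pos (by
              rw [hG' b2 List.mem_cons_self y2 (by rw [hGy2]; exact List.mem_cons_self), heq]
              simpa using hpw.1 b2 List.mem_cons_self)]
          simp
    · -- x's batch sorts after b: skip the whole b-group and recurse
      have hxb : ¬ keyB x < b := not_lt_of_gt hgt
      have hbx : b ≠ keyB x := ne_of_lt hgt
      rw [List.flatMap_cons]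
      rw [insertBy_append_left _ _ _ _ (fun y hy => by rw [hGb y hy]; simpa using hxb)]
      rw [ih hs.tail hG' hne']
      by_cases hmem : keyB x ∈ bs'
      · rw [if_pos hmem, if_pos (List.mem_cons_of_mem b hmem),
          List.flatMap_cons, if_neg hbx]
      · rw [if_neg hmem, if_neg (by
          intro hh; rcases List.mem_cons.mp hh with h1 | h1
          · exact hbx h1.symm
          · exact hmem h1)]
        rw [insertBy_cons, if_neg (by simpa using hxb), List.flatMap_cons, if_neg hbx]

theorem gfilter_append_singleton (b : String) (p : List (List (String × String)))
    (x : List (String × String)) :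
    gfilter b (p ++ [x]) = gfilter b p ++ (if keyB x = b then [x] else []) := by
  simp only [gfilter, List.filter_append, List.filter_cons, List.filter_nil]
  congr 1
  by_cases h : keyB x = b
  · rw [if_pos (show (pvGetK x "batch" == b) = true by simp [show pvGetK x "batch" = b from h]), if_pos h]
  · rw [if_neg (show ¬ (pvGetK x "batch" == b) = true by simp; exact fun hh => h hh), if_neg h]

theorem gfilter_eq_nil (b : String) (p : List (List (String × String)))
    (h : b ∉ p.map keyB) : gfilter b p = [] := by
  rw [gfilter, List.filter_eq_nil_iff]
  intro r hr hbeq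
  exact h (List.mem_map.mpr ⟨r, hr, by simpa [keyB] using hbeq⟩)

theorem sorted_grouped (runs : List (List (String × String))) :
    PySem.List.sorted runs keyB false =
      (PySem.List.sorted (PySem.Set.ofList (runs.map keyB)) (fun x => x) false).flatMap
        (fun b => gfilter b runs) := by
  induction runs using List.reverseRecOn with
  | nil => rfl
  | append_singleton p x ih =>
    have hL : PySem.List.sorted (p ++ [x]) keyB false =
        PySem.List.insertBy (fun a b => decide (keyB a < keyB b)) x
          (PySem.List.sorted p keyB false) := by
      rw [PySem.List.sorted_eq_foldl_insertBy, PySem.List.sorted_eq_foldl_insertBy,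
        List.foldl_append]
      rfl
    set bs := PySem.List.sorted (PySem.Set.ofList (p.map keyB)) (fun x => x) false with hbs
    have hpw := PySem.List.sorted_ofList_pairwise_lt (p.map keyB)
    have hG : ∀ b ∈ bs, ∀ r ∈ gfilter b p, keyB r = b := by
      intro b _ r hr
      have := (List.mem_filter.mp hr).2
      simpa [keyB] using this
    have hne : ∀ b ∈ bs, gfilter b p ≠ [] := by
      intro b hb
      apply gfilter_ne_nil
      have : b ∈ PySem.Set.ofList (p.map keyB) := (PySem.List.mem_sorted _ _ _ _).mp hb
      exact (PySem.Set.mem_ofList _ _).mp this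
    rw [hL, ih, insertBy_flatMap bs _ x hpw hG hne]
    have hmem_iff : keyB x ∈ bs ↔ keyB x ∈ p.map keyB := by
      rw [hbs, PySem.List.mem_sorted, PySem.Set.mem_ofList]
    rw [List.map_append, show List.map keyB [x] = [keyB x] from rfl]
    by_cases hmem : keyB x ∈ p.map keyB
    · rw [if_pos (hmem_iff.mpr hmem)]
      have hofl : PySem.Set.ofList (p.map keyB ++ [keyB x]) = PySem.Set.ofList (p.map keyB) := by
        rw [PySem.Set.ofList, List.foldl_append, List.foldl_cons, List.foldl_nil,
          ← PySem.Set.ofList, PySem.Set.add,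
          if_pos (by
            have h1 : keyB x ∈ PySem.Set.ofList (p.map keyB) := (PySem.Set.mem_ofList _ _).mpr hmem
            exact List.elem_eq_true_of_mem h1)]
      rw [hofl, ← hbs]
      apply flatMap_congr'
      intro b hb
      rw [gfilter_append_singleton]
      by_cases hbc : b = keyB x
      · rw [if_pos hbc, if_pos hbc.symm]
      · rw [if_neg hbc, if_neg (fun hh => hbc hh.symm), List.append_nil]
    · rw [if_neg (fun hh => hmem (hmem_iff.mp hh))]
      have hofl2 : PySem.Set.ofList (p.map keyB ++ [keyB x])
          = PySem.Set.ofList (p.map keyB) ++ [keyB x] := by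
        rw [PySem.Set.ofList, List.foldl_append, List.foldl_cons, List.foldl_nil,
          ← PySem.Set.ofList, PySem.Set.add, if_neg (by
            intro hc
            have : keyB x ∈ PySem.Set.ofList (p.map keyB) := by
              simpa [List.contains_iff_mem] using hc
            exact hmem ((PySem.Set.mem_ofList _ _).mp this))]
      have hsorted2 : PySem.List.sorted (PySem.Set.ofList (p.map keyB) ++ [keyB x])
            (fun x => x) false
          = PySem.List.insertBy (fun a b => decide (a < b)) (keyB x) bs := by
        rw [PySem.List.sorted_eq_foldl_insertBy, List.foldl_append, List.foldl_cons,
          List.foldl_nil, hbs, PySem.List.sorted_eq_foldl_insertBy]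
      rw [hofl2, hsorted2]
      apply flatMap_congr'
      intro b hb
      rcases (PySem.List.mem_insertBy _ _ _ _).mp hb with hbc | hbmem
      · rw [if_pos hbc, gfilter_append_singleton, gfilter_eq_nil b p (by rw [hbc]; exact hmem),
          if_pos hbc.symm, List.nil_append]
      · have hbc : ¬ b = keyB x := by
          intro hh; rw [hh] at hbmem; exact hmem (hmem_iff.mp hbmem)
        rw [if_neg hbc, gfilter_append_singleton, if_neg (fun hh => hbc hh.symm), List.append_nil]


-- characterisation of B's grouping pass

theorem keyB_mergeInto (a r : List (String × String)) : keyB (pvMergeInto a r) = keyB a := by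
  simp only [pvMergeInto, keyB]
  rw [pvGetK_pvSetK_ne _ _ _ _ (by decide), pvGetK_pvSetK_ne _ _ _ _ (by decide),
    pvGetK_pvSetK_ne _ _ _ _ (by decide)]

theorem keyB_foldl_mergeInto (t : List (List (String × String))) :
    ∀ a, keyB (t.foldl pvMergeInto a) = keyB a := by
  induction t with
  | nil => intro a; rfl
  | cons r t ih => intro a; rw [List.foldl_cons, ih, keyB_mergeInto]

theorem foldl_groupStep_run (t : List (List (String × String))) :
    ∀ (x : List (String × String)) (acc : List (List (String × String))),
    (∀ r ∈ t, keyB r = keyB x) →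
    t.foldl pvGroupStep (x :: acc) = (t.foldl pvMergeInto x) :: acc := by
  induction t with
  | nil => intro x acc _; rfl
  | cons r t ih =>
    intro x acc h
    simp only [List.foldl_cons, pvGroupStep]
    rw [if_pos (by
      have := h r List.mem_cons_self
      simp only [keyB] at this
      simp [this])]
    rw [ih (pvMergeInto x r) acc (fun s hs => by
      rw [h s (List.mem_cons_of_mem r hs), ← keyB_mergeInto x r])]

theorem foldl_groupStep_groups (bs : List String) :
    ∀ (G : String → List (List (String × String))) (acc : List (List (String × String))),
    bs.Pairwise (· < ·) → (∀ b ∈ bs, ∀ r ∈ G b, keyB r = b) → (∀ b ∈ bs, G b ≠ []) →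
    (∀ a, acc.head? = some a → keyB a ∉ bs) →
    (bs.flatMap G).foldl pvGroupStep acc = (bs.map (fun b => gfoldB (G b))).reverse ++ acc := by
  induction bs with
  | nil => intro G acc _ _ _ _; rfl
  | cons b bs' ih =>
    intro G acc hs hG hne hacc
    rcases hGy : G b with _ | ⟨y, t⟩
    · exact absurd hGy (hne b List.mem_cons_self)
    rw [List.flatMap_cons, List.foldl_append, hGy, List.foldl_cons]
    have hkey_y : keyB y = b := hG b List.mem_cons_self y (by rw [hGy]; exact List.mem_cons_self)
    have hfirst : pvGroupStep acc y = y :: acc := by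
      rcases acc with _ | ⟨a0, acc'⟩
      · rfl
      · simp only [pvGroupStep]
        rw [if_neg (by
          have h0 : keyB a0 ∉ b :: bs' := hacc a0 rfl
          have : keyB a0 ≠ keyB y := by rw [hkey_y]; exact fun hh => h0 (hh ▸ List.mem_cons_self)
          simpa [keyB] using this)]
    rw [hfirst, foldl_groupStep_run t y acc (fun r hr => by
      rw [hkey_y, hG b List.mem_cons_self r (by rw [hGy]; exact List.mem_cons_of_mem y hr)])]
    rw [ih G ((t.foldl pvMergeInto y) :: acc) hs.tail
      (fun b' hb' => hG b' (List.mem_cons_of_mem b hb'))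
      (fun b' hb' => hne b' (List.mem_cons_of_mem b hb'))
      (fun a ha => by
        have ha' : a = t.foldl pvMergeInto y := by
          have := ha
          simp only [List.head?] at this
          exact (Option.some_inj.mp this).symm
        rw [ha', keyB_foldl_mergeInto, hkey_y]
        intro hmem
        exact absurd ((List.pairwise_cons.mp hs).1 b hmem) (lt_irrefl b))]
    rw [List.map_cons, List.reverse_cons, List.append_assoc]
    simp [gfoldB, hGy]

theorem sort_runs_alt_char (runs : List (List (String × String))) :
    sort_runs_alt runs =
      (PySem.List.sorted (PySem.Set.ofList (runs.map keyB)) (fun x => x) false).map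
        (fun b => gfoldB (gfilter b runs)) := by
  show (((PySem.List.sorted runs keyB false).foldl pvGroupStep []).reverse = _)
  rw [sorted_grouped]
  rw [foldl_groupStep_groups _ _ []
    (PySem.List.sorted_ofList_pairwise_lt (runs.map keyB))
    (fun b _ r hr => by simpa [keyB] using (List.mem_filter.mp hr).2)
    (fun b hb => gfilter_ne_nil b runs
      ((PySem.Set.mem_ofList _ _).mp ((PySem.List.mem_sorted _ _ _ _).mp hb)))
    (fun a ha => by simp at ha)]
  simp


-- ===== VERDICT (by name: the statement is the Claim_ definition above) =====
theorem sort_runs_spec : Claim_equal_sort_runs := by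
  intro runs _ hpre
  unfold Spec_sort_runs
  show sort_runs runs = sort_runs_alt runs
  rw [sort_runs_char, sort_runs_alt_char]
  apply List.map_congr_left
  intro b _
  match hm : gfilter b runs with
  | [] => simp only [gmergeA, gfoldB, hm]
  | [h] => simp only [gmergeA, gfoldB, hm]; rfl
  | h :: r :: t =>
    simp only [gmergeA, gfoldB, hm]
    have hh : h ∈ gfilter b runs := by rw [hm]; exact List.mem_cons_self
    have hhr := List.mem_filter.mp hh
    have hkey : keyB h = b := by simpa [keyB] using hhr.2
    rcases hpre h hhr.1 with ⟨hnd, _, hkeys⟩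
    have hcount : 1 < runs.countP (fun r' => pvGetK r' "batch" == pvGetK h "batch") := by
      have : runs.countP (fun r' => pvGetK r' "batch" == pvGetK h "batch")
          = (gfilter b runs).length := by
        rw [List.countP_eq_length_filter, gfilter]
        congr 1
        apply List.filter_congr
        intro r' _
        rw [show pvGetK h "batch" = b from hkey]
      rw [this, hm]
      simp
    rcases hkeys hcount with ⟨hca, hua, hst⟩
    exact foldl_update_eq_foldl_merge (r :: t) h hnd hca hua hst
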